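-- pv_equiv track=rewrite | github.com/TDC-TangChaoBanLi/urdf2mjcf | urdf2mjcf/mjcf_generator.py | _infer_sensor_tags_from_state_ifaces
-- ===== SOURCE A (Python) =====
-- from typing import Any, Dict, List, Optional, Tuple, Union
--
-- def _infer_sensor_tags_from_state_ifaces(state_ifaces: List[str]) -> List[str]:
--     """EN: Infer sensor tags from state interfaces. CN: 从 state_interface 推断传感器类型。"""
--     s = [x.strip().lower() for x in state_ifaces]
--     tags: List[str] = []
--     if any(x.startswith("force.") or x == "force" for x in s):
--         tags.append("force")
--     if any(x.startswith("torque.") or x == "torque" for x in s):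
--         tags.append("torque")
--     if any("framequat" in x or x.endswith("quat") or "orientation" in x for x in s):
--         tags.append("framequat")
--     if any("gyro" in x or "angular_velocity" in x or "angvel" in x for x in s):
--         tags.append("gyro")
--     if any("accelerometer" in x or "accel" in x or "linear_acceleration" in x for x in s):
--         tags.append("accelerometer")
--     return tags
-- ===== SOURCE B (Python) =====
-- def _infer_sensor_tags_from_state_ifaces(state_ifaces):
--     """One pass: set a flag per sensor group, then emit tags in the fixed order."""
--     force = torque = framequat = gyro = accel = False
--     for raw in state_ifaces:
--         x = raw.strip().lower()
--         force = force or x.startswith("force.") or x == "force"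
--         torque = torque or x.startswith("torque.") or x == "torque"
--         framequat = framequat or "framequat" in x or x.endswith("quat") or "orientation" in x
--         gyro = gyro or "gyro" in x or "angular_velocity" in x or "angvel" in x
--         accel = accel or "accelerometer" in x or "accel" in x or "linear_acceleration" in x
--     out = []
--     for tag, hit in (("force", force), ("torque", torque), ("framequat", framequat),
--                      ("gyro", gyro), ("accelerometer", accel)):
--         if hit:
--             out.append(tag)
--     return out
-- ===== Notes on version B (the rewrite author's own statement) =====
-- stated objective: alternative
-- what changed: Replaces A's five separate any() scans over the normalized list with a single traversal that accumulates five boolean flags, followed by a fixed-order emission pass over (tag, flag) pairs.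
import Mathlib
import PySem

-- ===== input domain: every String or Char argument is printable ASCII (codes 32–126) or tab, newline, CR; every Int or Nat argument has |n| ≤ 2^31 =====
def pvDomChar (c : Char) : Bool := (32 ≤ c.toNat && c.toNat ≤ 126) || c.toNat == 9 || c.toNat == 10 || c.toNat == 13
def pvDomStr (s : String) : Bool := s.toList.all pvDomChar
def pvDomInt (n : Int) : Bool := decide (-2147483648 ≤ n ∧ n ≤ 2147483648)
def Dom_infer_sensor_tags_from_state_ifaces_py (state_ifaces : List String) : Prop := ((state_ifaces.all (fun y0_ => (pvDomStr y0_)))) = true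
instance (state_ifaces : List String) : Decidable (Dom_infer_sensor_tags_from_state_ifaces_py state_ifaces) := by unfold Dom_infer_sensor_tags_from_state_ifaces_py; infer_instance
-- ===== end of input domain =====

-- Shared predicate helpers (x is already stripped and lowered; used verbatim by both ports)
def pvNorm (x : String) : String := PySem.Str.lower (PySem.Str.strip x)
def pvIsForce (x : String) : Bool := PySem.Str.startswith x "force." || x == "force"
def pvIsTorque (x : String) : Bool := PySem.Str.startswith x "torque." || x == "torque"
def pvIsQuat (x : String) : Bool := PySem.Str.isIn "framequat" x || PySem.Str.endswith x "quat" || PySem.Str.isIn "orientation" x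
def pvIsGyro (x : String) : Bool := PySem.Str.isIn "gyro" x || PySem.Str.isIn "angular_velocity" x || PySem.Str.isIn "angvel" x
def pvIsAccel (x : String) : Bool := PySem.Str.isIn "accelerometer" x || PySem.Str.isIn "accel" x || PySem.Str.isIn "linear_acceleration" x

-- ===== PORT A =====
-- A: normalize the whole list, then five separate any() scans, appending after each.
def infer_sensor_tags_from_state_ifaces_py (state_ifaces : List String) : List String :=
  let s := state_ifaces.map pvNorm
  let tags : List String := []
  let tags := if s.any pvIsForce then tags ++ ["force"] else tags
  let tags := if s.any pvIsTorque then tags ++ ["torque"] else tags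
  let tags := if s.any pvIsQuat then tags ++ ["framequat"] else tags
  let tags := if s.any pvIsGyro then tags ++ ["gyro"] else tags
  let tags := if s.any pvIsAccel then tags ++ ["accelerometer"] else tags
  tags

-- ===== PORT B =====
-- B: one fold over the raw list accumulating five boolean flags, then a fixed-order emission pass.
def infer_sensor_tags_from_state_ifaces_py_alt (state_ifaces : List String) : List String :=
  let st := state_ifaces.foldl
    (fun (f : Bool × Bool × Bool × Bool × Bool) raw =>
      let x := pvNorm raw
      (f.1 || pvIsForce x, f.2.1 || pvIsTorque x, f.2.2.1 || pvIsQuat x,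
       f.2.2.2.1 || pvIsGyro x, f.2.2.2.2 || pvIsAccel x))
    (false, false, false, false, false)
  [("force", st.1), ("torque", st.2.1), ("framequat", st.2.2.1),
   ("gyro", st.2.2.2.1), ("accelerometer", st.2.2.2.2)].foldl
    (fun out p => if p.2 then out ++ [p.1] else out) []

-- ===== PRECONDITION & SPEC =====
def Spec_infer_sensor_tags_from_state_ifaces_py (state_ifaces : List String) (out : List String) : Prop := out = infer_sensor_tags_from_state_ifaces_py_alt state_ifaces
instance (state_ifaces : List String) (out : List String) : Decidable (Spec_infer_sensor_tags_from_state_ifaces_py state_ifaces out) := by unfold Spec_infer_sensor_tags_from_state_ifaces_py; infer_instance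

-- ===== CLAIM (what is proved, stated in full; the proofs are below) =====
def Claim_equal_infer_sensor_tags_from_state_ifaces_py : Prop := ∀ (state_ifaces : List String), Dom_infer_sensor_tags_from_state_ifaces_py state_ifaces → Spec_infer_sensor_tags_from_state_ifaces_py state_ifaces (infer_sensor_tags_from_state_ifaces_py state_ifaces)

-- ===== LEMMAS AND PROOFS =====

-- B's flag-accumulating fold computes exactly the five any() values.
theorem pvFold_eq_any (l : List String) (f : Bool × Bool × Bool × Bool × Bool) :
    l.foldl
      (fun (f : Bool × Bool × Bool × Bool × Bool) raw =>
        let x := pvNorm raw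
        (f.1 || pvIsForce x, f.2.1 || pvIsTorque x, f.2.2.1 || pvIsQuat x,
         f.2.2.2.1 || pvIsGyro x, f.2.2.2.2 || pvIsAccel x)) f =
    (f.1 || (l.map pvNorm).any pvIsForce,
     f.2.1 || (l.map pvNorm).any pvIsTorque,
     f.2.2.1 || (l.map pvNorm).any pvIsQuat,
     f.2.2.2.1 || (l.map pvNorm).any pvIsGyro,
     f.2.2.2.2 || (l.map pvNorm).any pvIsAccel) := by
  induction l generalizing f with
  | nil => simp
  | cons h t ih => simp [List.foldl_cons, ih, Bool.or_assoc]

-- ===== VERDICT (by name: the statement is the Claim_ definition above) =====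
theorem infer_sensor_tags_from_state_ifaces_py_spec : Claim_equal_infer_sensor_tags_from_state_ifaces_py := by
  intro l _
  simp only [Spec_infer_sensor_tags_from_state_ifaces_py,
    infer_sensor_tags_from_state_ifaces_py, infer_sensor_tags_from_state_ifaces_py_alt,
    pvFold_eq_any]
  cases (l.map pvNorm).any pvIsForce <;>
  cases (l.map pvNorm).any pvIsTorque <;>
  cases (l.map pvNorm).any pvIsQuat <;>
  cases (l.map pvNorm).any pvIsGyro <;>
  cases (l.map pvNorm).any pvIsAccel <;> rfl
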